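-- pv_equiv track=rewrite | github.com/kklimas/leetcode-daily | january/12.py | halves_are_like
-- ===== SOURCE A (Python) =====
-- def halves_are_like(s):
--     n = len(s)
--     half = n // 2
--     vowels = ['a', 'e', 'i', 'o', 'u', 'A', 'E', 'I', 'O', 'U']
--     counter = 0
--
--     for i, letter in enumerate(s):
--         sign = 1
--         if i >= half:
--             sign = -1
--         if letter in vowels:
--             counter += sign
--     return counter == 0
-- ===== SOURCE B (Python) =====
-- def halves_are_like(s):
--     # Collect the indices of all vowels; the two halves have equal vowel counts
--     # iff the vowel count m is even and the vowel index list straddles the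
--     # midpoint exactly at its own middle: pos[m//2 - 1] lies in the left half
--     # and pos[m//2] in the right half.
--     pos = [i for i, c in enumerate(s) if c in 'aeiouAEIOU']
--     m = len(pos)
--     if m % 2 == 1:
--         return False
--     if m == 0:
--         return True
--     half = len(s) // 2
--     return pos[m // 2 - 1] < half <= pos[m // 2]
-- ===== Notes on version B (the rewrite author's own statement) =====
-- stated objective: alternative
-- what changed: Instead of A's signed-accumulator pass over enumerate with a per-character sign test, B builds the sorted list of vowel positions in one comprehension and decides the answer by a boundary test on two elements: counts are equal iff the total is even and the middle pair of vowel positions straddles len(s)//2.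
import Mathlib
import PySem

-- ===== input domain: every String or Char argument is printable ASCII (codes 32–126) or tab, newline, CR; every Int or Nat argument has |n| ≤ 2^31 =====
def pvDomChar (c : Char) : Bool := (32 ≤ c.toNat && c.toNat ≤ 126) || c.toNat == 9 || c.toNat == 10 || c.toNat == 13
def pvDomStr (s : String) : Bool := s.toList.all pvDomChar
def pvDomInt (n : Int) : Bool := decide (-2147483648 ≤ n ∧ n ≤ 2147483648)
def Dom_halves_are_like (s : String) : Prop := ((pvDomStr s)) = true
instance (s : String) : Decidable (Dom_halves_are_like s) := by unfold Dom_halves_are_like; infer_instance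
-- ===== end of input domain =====

-- B replaces A's signed-accumulator counting pass by a different algorithm: it collects the
-- list of vowel positions and answers by a boundary test on the middle pair of that list.

-- ===== PORT A =====
def pvVowelsA : List Char := ['a', 'e', 'i', 'o', 'u', 'A', 'E', 'I', 'O', 'U']

def halves_are_like (s : String) : Bool :=
  let n : Int := PySem.Str.len s
  let half : Int := PySem.Int.floordiv n 2
  let counter : Int :=
    (PySem.List.enumerate s.toList 0).foldl
      (fun counter p =>
        let sign : Int := if p.1 ≥ half then -1 else 1
        if pvVowelsA.contains p.2 then counter + sign else counter) 0
  counter == 0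

-- ===== PORT B =====
def pvIsVowel (c : Char) : Bool := "aeiouAEIOU".toList.contains c

-- pos = [i for i, c in enumerate(s) if c in 'aeiouAEIOU']
def halves_are_like_alt (s : String) : Bool :=
  let pos : List Int :=
    ((PySem.List.enumerate s.toList 0).filter (fun p => pvIsVowel p.2)).map Prod.fst
  let m : Nat := pos.length
  if m % 2 == 1 then false
  else if m == 0 then true
  else
    let half : Int := PySem.Int.floordiv (PySem.Str.len s) 2
    -- pos[m//2 - 1] and pos[m//2]: both indices are in range here (m even, m ≥ 2)
    decide (pos.getD (m / 2 - 1) 0 < half ∧ half ≤ pos.getD (m / 2) 0)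

-- ===== PRECONDITION & SPEC =====
def Spec_halves_are_like (s : String) (out : Bool) : Prop := out = halves_are_like_alt s
instance (s : String) (out : Bool) : Decidable (Spec_halves_are_like s out) := by unfold Spec_halves_are_like; infer_instance

-- ===== CLAIM (what is proved, stated in full; the proofs are below) =====
def Claim_equal_halves_are_like : Prop := ∀ (s : String), Dom_halves_are_like s → Spec_halves_are_like s (halves_are_like s)

-- ===== LEMMAS AND PROOFS =====

def pvCountVowels (l : List Char) : Nat := l.countP pvIsVowel

def pvPos (l : List Char) (k : Int) : List Int :=
  ((PySem.List.enumerate l k).filter (fun p => pvIsVowel p.2)).map Prod.fst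

-- A's fold computes (left-half vowel count) − (right-half vowel count)
theorem pv_fold_key (half : Int) (l : List Char) : ∀ (k c : Int),
    (PySem.List.enumerate l k).foldl
      (fun counter p =>
        let sign : Int := if p.1 ≥ half then -1 else 1
        if pvVowelsA.contains p.2 then counter + sign else counter) c
    = c + (pvCountVowels (l.take (half - k).toNat) : Int)
        - (pvCountVowels (l.drop (half - k).toNat) : Int) := by
  induction l with
  | nil => intro k c; simp [PySem.List.enumerate_nil, pvCountVowels]
  | cons x xs ih =>
    intro k c
    rw [PySem.List.enumerate_cons]
    simp only [List.foldl_cons]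
    rw [ih (k + 1)]
    have hv : pvVowelsA.contains x = pvIsVowel x := by
      simp [pvVowelsA, pvIsVowel]
    by_cases hk : k ≥ half
    · have h1 : (half - k).toNat = 0 := by omega
      have h2 : (half - (k + 1)).toNat = 0 := by omega
      by_cases hx : pvIsVowel x = true
      · simp only [h1, h2, hk, hv, hx, if_pos, pvCountVowels,
          List.countP_cons, List.take_zero, List.drop_zero]
        simp
        omega
      · simp only [h1, h2, hv, pvCountVowels, List.take_zero, List.drop_zero]
        simp [hx]
    · have h1 : (half - k).toNat = (half - (k + 1)).toNat + 1 := by omega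
      by_cases hx : pvIsVowel x = true
      · simp only [h1, hv, pvCountVowels, List.take_succ_cons, List.drop_succ_cons,
          List.countP_cons]
        simp [hx, hk]
        omega
      · simp only [h1, hv, pvCountVowels, List.take_succ_cons, List.drop_succ_cons,
          List.countP_cons]
        simp [hx]

theorem pvPos_nil (k : Int) : pvPos [] k = [] := by
  simp [pvPos, PySem.List.enumerate_nil]

theorem pvPos_cons (x : Char) (xs : List Char) (k : Int) :
    pvPos (x :: xs) k = if pvIsVowel x then k :: pvPos xs (k + 1) else pvPos xs (k + 1) := by
  by_cases hx : pvIsVowel x = true <;>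
    simp [pvPos, PySem.List.enumerate_cons, hx]

theorem pvPos_length (l : List Char) : ∀ k, (pvPos l k).length = l.countP pvIsVowel := by
  induction l with
  | nil => intro k; simp [pvPos_nil]
  | cons x xs ih =>
    intro k
    rw [pvPos_cons, List.countP_cons]
    by_cases hx : pvIsVowel x = true <;> simp [hx, ih]

theorem pvPos_lb (l : List Char) : ∀ k, ∀ i ∈ pvPos l k, k ≤ i := by
  induction l with
  | nil => intro k i hi; simp [pvPos_nil] at hi
  | cons x xs ih =>
    intro k i hi
    rw [pvPos_cons] at hi
    by_cases hx : pvIsVowel x = true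
    · simp [hx] at hi
      rcases hi with rfl | hi
      · omega
      · have := ih (k + 1) i hi; omega
    · simp [hx] at hi
      have := ih (k + 1) i hi; omega

theorem pvPos_sorted (l : List Char) : ∀ k, (pvPos l k).Pairwise (· < ·) := by
  induction l with
  | nil => intro k; simp [pvPos_nil]
  | cons x xs ih =>
    intro k
    rw [pvPos_cons]
    by_cases hx : pvIsVowel x = true
    · simp only [hx, if_true]
      refine List.Pairwise.cons ?_ (ih (k + 1))
      intro i hi
      have := pvPos_lb xs (k + 1) i hi; omega
    · rw [if_neg (by simp [hx])]
      exact ih (k + 1)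

theorem pvPos_countLT (h : Int) (l : List Char) : ∀ k,
    (pvPos l k).countP (fun i => decide (i < h)) = (l.take (h - k).toNat).countP pvIsVowel := by
  induction l with
  | nil => intro k; simp [pvPos_nil]
  | cons x xs ih =>
    intro k
    rw [pvPos_cons]
    by_cases hk : k < h
    · have h1 : (h - k).toNat = (h - (k + 1)).toNat + 1 := by omega
      rw [h1, List.take_succ_cons, List.countP_cons]
      by_cases hx : pvIsVowel x = true
      · rw [if_pos hx, List.countP_cons, ih]
        simp [hx, hk]
      · rw [if_neg (by simp [hx]), ih]
        simp [hx]
    · have h1 : (h - k).toNat = 0 := by omega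
      have h2 : (h - (k + 1)).toNat = 0 := by omega
      rw [h1, List.take_zero]
      by_cases hx : pvIsVowel x = true
      · rw [if_pos hx, List.countP_cons, ih, h2]
        simp [hk]
      · rw [if_neg (by simp [hx]), ih, h2]
        simp

-- for a strictly increasing list, an element < h at index j forces at least j+1 elements < h
theorem pv_cnt_ge (pos : List Int) (h : Int) (hp : pos.Pairwise (· < ·))
    (j : Nat) (hj : j < pos.length) (hlt : pos[j] < h) :
    j + 1 ≤ pos.countP (fun i => decide (i < h)) := by
  have hmono := List.pairwise_iff_getElem.mp hp
  have hsplit : pos.countP (fun i => decide (i < h)) =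
      (pos.take (j + 1)).countP (fun i => decide (i < h)) +
      (pos.drop (j + 1)).countP (fun i => decide (i < h)) := by
    rw [← List.countP_append, List.take_append_drop]
  have htake : (pos.take (j + 1)).countP (fun i => decide (i < h)) = (pos.take (j + 1)).length := by
    apply List.countP_eq_length.mpr
    intro y hy
    obtain ⟨i, hi, rfl⟩ := List.mem_iff_getElem.mp hy
    have hil : i < j + 1 := lt_of_lt_of_le hi (by simp)
    rw [List.getElem_take]
    rcases Nat.lt_or_ge i j with hij | hij
    · have := hmono i j (by omega) hj hij
      simp; omega
    · have : i = j := by omega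
      subst this
      simp; omega
  have hlen : (pos.take (j + 1)).length = j + 1 := by
    simp; omega
  omega

-- an element ≥ h at index j forces at most j elements < h
theorem pv_cnt_le (pos : List Int) (h : Int) (hp : pos.Pairwise (· < ·))
    (j : Nat) (hj : j < pos.length) (hge : h ≤ pos[j]) :
    pos.countP (fun i => decide (i < h)) ≤ j := by
  have hmono := List.pairwise_iff_getElem.mp hp
  have hsplit : pos.countP (fun i => decide (i < h)) =
      (pos.take j).countP (fun i => decide (i < h)) +
      (pos.drop j).countP (fun i => decide (i < h)) := by
    rw [← List.countP_append, List.take_append_drop]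
  have hdrop : (pos.drop j).countP (fun i => decide (i < h)) = 0 := by
    apply List.countP_eq_zero.mpr
    intro y hy
    obtain ⟨i, hi, rfl⟩ := List.mem_iff_getElem.mp hy
    have hi' : j + i < pos.length := by simp at hi; omega
    have key : h ≤ pos[j + i]'hi' := by
      rcases Nat.eq_zero_or_pos i with hi0 | hipos
      · subst hi0; simpa using hge
      · exact le_of_lt (lt_of_le_of_lt hge (hmono j (j + i) hj hi' (by omega)))
    have hdg : (pos.drop j)[i] = pos[j + i]'hi' := List.getElem_drop ..
    simp only [decide_eq_true_eq, hdg]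
    exact not_lt.mpr key
  have := List.countP_le_length (l := pos.take j) (p := fun i => decide (i < h))
  have hlen : (pos.take j).length ≤ j := by simp
  omega

-- boundary characterization: for strictly increasing pos of even positive length m,
-- exactly m/2 elements are < h iff pos[m/2-1] < h ≤ pos[m/2]
theorem pv_boundary (pos : List Int) (h : Int) (hp : pos.Pairwise (· < ·))
    (m : Nat) (hm : m = pos.length) (hev : m % 2 = 0) (hpos : 0 < m) :
    (pos.countP (fun i => decide (i < h)) = m / 2 ↔
      pos.getD (m / 2 - 1) 0 < h ∧ h ≤ pos.getD (m / 2) 0) := by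
  have hm2 : 2 ≤ m := by omega
  have hj1 : m / 2 - 1 < pos.length := by omega
  have hj2 : m / 2 < pos.length := by omega
  rw [List.getD_eq_getElem pos 0 hj1, List.getD_eq_getElem pos 0 hj2]
  constructor
  · intro hc
    constructor
    · by_contra hcon
      rw [not_lt] at hcon
      have := pv_cnt_le pos h hp (m / 2 - 1) hj1 hcon
      omega
    · by_contra hcon
      rw [not_le] at hcon
      have := pv_cnt_ge pos h hp (m / 2) hj2 hcon
      omega
  · rintro ⟨h1, h2⟩
    have hge := pv_cnt_ge pos h hp (m / 2 - 1) hj1 h1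
    have hle := pv_cnt_le pos h hp (m / 2) hj2 h2
    omega

theorem halves_are_like_eq (s : String) : halves_are_like s = halves_are_like_alt s := by
  unfold halves_are_like halves_are_like_alt
  have hlen : PySem.Str.len s = (s.toList.length : Int) := PySem.Str.len_eq s
  have hfd : PySem.Int.floordiv (s.toList.length : Int) 2
      = ((s.toList.length / 2 : Nat) : Int) := by
    exact_mod_cast PySem.Int.floordiv_natCast s.toList.length 2
  simp only [hlen, hfd]
  rw [pv_fold_key]
  set l := s.toList with hl
  set halfN : Nat := l.length / 2 with hhalf
  have ht : (((halfN : Int)) - 0).toNat = halfN := by omega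
  rw [ht]
  set L := pvCountVowels (l.take halfN) with hL
  set R := pvCountVowels (l.drop halfN) with hR
  -- the position list of B
  have hposeq : ((PySem.List.enumerate l 0).filter (fun p => pvIsVowel p.2)).map Prod.fst
      = pvPos l 0 := rfl
  rw [hposeq]
  set pos := pvPos l 0 with hpos
  have hmlen : pos.length = L + R := by
    rw [hpos, pvPos_length, hL, hR, pvCountVowels, pvCountVowels,
      ← List.countP_append, List.take_append_drop]
  have hcLT : pos.countP (fun i => decide (i < (halfN : Int))) = L := by
    rw [hpos, pvPos_countLT]
    simp [hL, pvCountVowels]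
  set m : Nat := pos.length with hm
  by_cases hodd : m % 2 = 1
  · -- m odd: L ≠ R, A is false, B is false
    have hLR : L ≠ R := by omega
    simp [hodd]
    omega
  · by_cases hz : m = 0
    · have hL0 : L = 0 := by omega
      have hR0 : R = 0 := by omega
      simp [hz, hL0, hR0]
    · have hev : m % 2 = 0 := by omega
      have hposm : 0 < m := by omega
      have hb := pv_boundary pos (halfN : Int) (by rw [hpos]; exact pvPos_sorted l 0)
        m hm hev hposm
      rw [hcLT] at hb
      have hiff : (0 + (L : Int) - R = 0) ↔ (L = m / 2) := by omega
      have hne1 : (m % 2 == 1) = false := by simp [hev]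
      have hne0 : (m == 0) = false := by simp [hz]
      simp only [hne1, hne0, Bool.false_eq_true, if_false]
      by_cases hc : L = m / 2
      · have hA : (0 + (L : Int) - R == 0) = true := by simp; omega
        rw [hA]
        exact (decide_eq_true (hb.mp hc)).symm
      · have hA : (0 + (L : Int) - R == 0) = false := by simp; omega
        rw [hA]
        exact (decide_eq_false fun hcon => hc (hb.mpr hcon)).symm

-- ===== VERDICT (by name: the statement is the Claim_ definition above) =====
theorem halves_are_like_spec : Claim_equal_halves_are_like := by
  intro s _
  unfold Spec_halves_are_like
  exact halves_are_like_eq s
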